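-- pv_equiv track=rewrite | github.com/Karthikeya-ai-glitch/AI-Resume-Analyzer | App/resume_utils.py | recommend_roles
-- ===== SOURCE A (Python) =====
-- def recommend_roles(skills, roles_dict):
--     role_scores = {}
--     for role, data in roles_dict.items():
--         required = set([s.lower() for s in data['required_skills']])
--         score = len(required & set([s.lower() for s in skills]))
--         role_scores[role] = score
--
--     sorted_roles = sorted(role_scores.items(), key=lambda x: x[1], reverse=True)
--     recommended = [role for role, score in sorted_roles if score > 0]
--     return recommended[:3]  # top 3 matches
-- ===== SOURCE B (Python) =====
-- def recommend_roles(skills, roles_dict):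
--     # Inverted index: skill -> roles requiring it; user skills lowered once.
--     index = {}
--     role_scores = {}
--     for role, data in roles_dict.items():
--         role_scores[role] = 0
--         seen = set()
--         for s in data['required_skills']:
--             sl = s.lower()
--             if sl not in seen:
--                 seen.add(sl)
--                 index.setdefault(sl, []).append(role)
--     for sl in set(s.lower() for s in skills):
--         for r in index.get(sl, []):
--             role_scores[r] += 1
--     ranked = sorted(role_scores.items(), key=lambda x: x[1], reverse=True)
--     return [role for role, score in ranked if score > 0][:3]
-- ===== Notes on version B (the rewrite author's own statement) =====
-- stated objective: faster
-- what changed: Replaces the per-role set-intersection (which rebuilds the lowered user-skill set for every role) with an inverted index skill->roles built in one pass plus a single pass over the deduplicated user skills that increments scores through the index.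
import Mathlib
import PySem

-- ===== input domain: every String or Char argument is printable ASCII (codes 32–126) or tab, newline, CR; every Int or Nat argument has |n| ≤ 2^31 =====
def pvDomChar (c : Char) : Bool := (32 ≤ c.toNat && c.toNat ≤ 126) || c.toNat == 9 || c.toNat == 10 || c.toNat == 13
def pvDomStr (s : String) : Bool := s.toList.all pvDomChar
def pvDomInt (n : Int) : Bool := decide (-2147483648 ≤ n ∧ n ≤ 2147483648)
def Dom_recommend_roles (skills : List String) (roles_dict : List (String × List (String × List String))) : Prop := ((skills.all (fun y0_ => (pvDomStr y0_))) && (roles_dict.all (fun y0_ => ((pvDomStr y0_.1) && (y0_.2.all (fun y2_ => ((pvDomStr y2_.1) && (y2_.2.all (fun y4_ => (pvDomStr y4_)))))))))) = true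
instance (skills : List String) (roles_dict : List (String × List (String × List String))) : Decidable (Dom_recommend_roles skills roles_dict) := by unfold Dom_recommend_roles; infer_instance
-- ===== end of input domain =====

-- B replaces A's per-role set intersection (which re-lowers the whole user skill list for every
-- role) with an inverted index skill -> roles built in one pass, then one pass over the
-- deduplicated user skills incrementing scores through the index (objective: faster).

-- data['required_skills']: first-match dict lookup; Pre_ guarantees the key is present
-- (Python raises KeyError otherwise), so the [] default is never used inside Pre_.
def pvReq (data : List (String × List String)) : List String :=
  (PySem.Dict.mk data).getD "required_skills" []

-- ===== PORT A =====
def recommend_roles (skills : List String) (roles_dict : List (String × List (String × List String))) : List String :=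
  let role_scores : PySem.Dict String Int :=
    roles_dict.foldl (fun rs p =>
      let required : PySem.Set String := PySem.Set.ofList ((pvReq p.2).map PySem.Str.lower)
      let score : Int := (PySem.Set.inter required (PySem.Set.ofList (skills.map PySem.Str.lower))).length
      rs.insert p.1 score) PySem.Dict.empty
  let sorted_roles := PySem.List.sorted role_scores.items (fun x => x.2) true
  let recommended := (sorted_roles.filter (fun p => decide (p.2 > 0))).map (·.1)
  PySem.List.slice recommended none (some 3)

-- ===== PORT B =====
def recommend_roles_alt (skills : List String) (roles_dict : List (String × List (String × List String))) : List String :=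
  -- phase 1: one pass over the roles, building (index, role_scores-with-all-zeros)
  let st := roles_dict.foldl
    (fun (st : PySem.Dict String (List String) × PySem.Dict String Int) p =>
      (((pvReq p.2).foldl (fun (q : PySem.Set String × PySem.Dict String (List String)) s =>
          let sl := PySem.Str.lower s
          if PySem.Set.contains q.1 sl then q
          else (PySem.Set.add q.1 sl, q.2.modify sl [] (· ++ [p.1])))
        (PySem.Set.empty, st.1)).2,
       st.2.insert p.1 0))
    (PySem.Dict.empty, PySem.Dict.empty)
  let index := st.1
  -- phase 2: one pass over the deduplicated lowered user skills, bumping scores via the index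
  let role_scores := (PySem.Set.ofList (skills.map PySem.Str.lower)).foldl
    (fun rs sl => (index.getD sl []).foldl (fun rs r => rs.modify r 0 (· + 1)) rs) st.2
  let ranked := PySem.List.sorted role_scores.items (fun x => x.2) true
  PySem.List.slice ((ranked.filter (fun p => decide (p.2 > 0))).map (·.1)) none (some 3)

-- ===== PRECONDITION & SPEC =====
-- Pre_ requires (a) each role's data to contain the key 'required_skills' — Python A raises
-- KeyError otherwise (and B raises there too) — and (b) the role keys to be distinct, which a
-- Python dict guarantees by construction (duplicate keys exist only in the list encoding).
def Pre_recommend_roles (skills : List String) (roles_dict : List (String × List (String × List String))) : Prop :=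
  (roles_dict.map Prod.fst).Nodup ∧ ∀ p ∈ roles_dict, (PySem.Dict.mk p.2).contains "required_skills" = true
instance (skills : List String) (roles_dict : List (String × List (String × List String))) : Decidable (Pre_recommend_roles skills roles_dict) := by unfold Pre_recommend_roles; infer_instance

def pvWitness_recommend_roles : List String × (List (String × List (String × List String))) :=
  (["Python", "sql"], [("Data Analyst", [("required_skills", ["SQL", "python"])]), ("Clerk", [("required_skills", ["filing"])])])

def Spec_recommend_roles (skills : List String) (roles_dict : List (String × List (String × List String))) (out : List String) : Prop := out = recommend_roles_alt skills roles_dict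
instance (skills : List String) (roles_dict : List (String × List (String × List String))) (out : List String) : Decidable (Spec_recommend_roles skills roles_dict out) := by unfold Spec_recommend_roles; infer_instance

-- ===== CLAIM (what is proved, stated in full; the proofs are below) =====
def Claim_equal_recommend_roles : Prop := ∀ (skills : List String) (roles_dict : List (String × List (String × List String))), Dom_recommend_roles skills roles_dict → Pre_recommend_roles skills roles_dict → Spec_recommend_roles skills roles_dict (recommend_roles skills roles_dict)


-- ===== LEMMAS AND PROOFS =====

-- the inner 'seen' loop of phase 1: appends role once to index[sl] iff sl is a lowered
-- required skill not already seen
theorem pv_inner_getD (reqs : List String) (seen : PySem.Set String)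
    (idx : PySem.Dict String (List String)) (role sl : String) :
    ((reqs.foldl (fun (q : PySem.Set String × PySem.Dict String (List String)) s =>
        if PySem.Set.contains q.1 (PySem.Str.lower s) then q
        else (PySem.Set.add q.1 (PySem.Str.lower s), q.2.modify (PySem.Str.lower s) [] (· ++ [role]))) (seen, idx)).2).getD sl []
    = idx.getD sl [] ++ (if sl ∈ reqs.map PySem.Str.lower ∧ sl ∉ seen then [role] else []) := by
  induction reqs generalizing seen idx with
  | nil => simp
  | cons s rest ih =>
    simp only [List.foldl_cons, List.map_cons, List.mem_cons]
    by_cases hc : PySem.Set.contains seen (PySem.Str.lower s) = true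
    · have hmem : PySem.Str.lower s ∈ seen := (PySem.Set.contains_iff _ _).1 hc
      simp only [hc, if_true]
      rw [ih]
      congr 1
      by_cases he : sl = PySem.Str.lower s
      · subst he; simp [hmem]
      · simp [he]
    · have hnm : PySem.Str.lower s ∉ seen := fun h => hc ((PySem.Set.contains_iff _ _).2 h)
      have hcf : seen.contains (PySem.Str.lower s) = false := by simpa using hc
      simp only [hcf, Bool.false_eq_true, if_false]
      rw [ih]
      by_cases he : sl = PySem.Str.lower s
      · subst he
        rw [PySem.Dict.getD_modify]
        simp [hnm]
      · rw [PySem.Dict.getD_modify]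
        simp only [he, if_false]
        congr 1
        have : (sl ∈ PySem.Set.add seen (PySem.Str.lower s)) ↔ sl ∈ seen := by
          simp [PySem.Set.mem_add, he]
        simp [this]

-- the index after phase 1: index[sl] lists, in roles_dict order, the roles requiring sl
theorem pv_index_getD (roles : List (String × List (String × List String)))
    (idx0 : PySem.Dict String (List String)) (sl : String) :
    ((roles.foldl (fun idx p =>
        ((pvReq p.2).foldl (fun (q : PySem.Set String × PySem.Dict String (List String)) s =>
          if PySem.Set.contains q.1 (PySem.Str.lower s) then q
          else (PySem.Set.add q.1 (PySem.Str.lower s), q.2.modify (PySem.Str.lower s) [] (· ++ [p.1]))) (PySem.Set.empty, idx)).2) idx0)).getD sl []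
    = idx0.getD sl [] ++ (roles.filter (fun p => decide (sl ∈ (pvReq p.2).map PySem.Str.lower))).map (·.1) := by
  induction roles generalizing idx0 with
  | nil => simp
  | cons p rest ih =>
    simp only [List.foldl_cons]
    rw [ih, pv_inner_getD]
    by_cases hm : sl ∈ (pvReq p.2).map PySem.Str.lower
    · rw [List.filter_cons_of_pos (by simpa using hm), List.map_cons]
      simp [hm, PySem.Set.empty]
    · rw [List.filter_cons_of_neg (by simpa using hm)]
      simp [hm, PySem.Set.empty]

-- phase 2 value: each user skill adds (number of occurrences of r in its index bucket)
theorem pv_phase2_getD (us : List String) (idx : PySem.Dict String (List String))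
    (rs : PySem.Dict String Int) (r : String) :
    (us.foldl (fun rs sl => (idx.getD sl []).foldl (fun rs r => rs.modify r 0 (· + 1)) rs) rs).getD r 0
    = rs.getD r 0 + (us.map (fun sl => (((idx.getD sl []).count r : Int)))).sum := by
  induction us generalizing rs with
  | nil => simp
  | cons sl rest ih =>
    simp only [List.foldl_cons, List.map_cons, List.sum_cons]
    rw [ih, PySem.Dict.getD_foldl_modify_add_one]
    ring

-- phase 2 keys: modifying keys that are already present leaves d.keys unchanged
theorem pv_phase2_keys (us : List String) (idx : PySem.Dict String (List String))
    (rs : PySem.Dict String Int)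
    (h : ∀ sl ∈ us, ∀ x ∈ idx.getD sl [], x ∈ rs.keys) :
    (us.foldl (fun rs sl => (idx.getD sl []).foldl (fun rs r => rs.modify r 0 (· + 1)) rs) rs).keys
    = rs.keys := by
  induction us generalizing rs with
  | nil => rfl
  | cons sl rest ih =>
    simp only [List.foldl_cons]
    have hk : ((idx.getD sl []).foldl (fun rs r => rs.modify r 0 (· + 1)) rs).keys = rs.keys := by
      rw [PySem.Dict.keys_foldl_modify (f := fun _ _ v => v + 1)]
      rw [PySem.Set.update_eq_append_filter]
      have : (PySem.Set.ofList (idx.getD sl [])).filter (fun y => !(PySem.Set.contains rs.keys y)) = [] := by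
        apply List.filter_eq_nil_iff.2
        intro x hx
        have : x ∈ rs.keys := h sl (by simp) x ((PySem.Set.mem_ofList _ _).1 hx)
        simp [this]
      rw [this, List.append_nil]
    rw [ih _ (fun s hs x hx => by rw [hk]; exact h s (by simp [hs]) x hx) |>.trans hk]

-- counting a role in a filtered projection of a key-nodup roles list
theorem pv_count_filter (roles : List (String × List (String × List String)))
    (hnd : (roles.map Prod.fst).Nodup) (p : String × List (String × List String))
    (hp : p ∈ roles) (q : (String × List (String × List String)) → Bool) :
    ((roles.filter q).map (·.1)).count p.1 = if q p then 1 else 0 := by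
  have hsub : ((roles.filter q).map (·.1)).Sublist (roles.map Prod.fst) :=
    List.Sublist.map _ List.filter_sublist
  have hndf : ((roles.filter q).map (·.1)).Nodup := hnd.sublist hsub
  have hinj : ∀ x ∈ roles, ∀ y ∈ roles, x.1 = y.1 → x = y := by
    exact fun x hx y hy hxy => List.inj_on_of_nodup_map hnd hx hy hxy
  by_cases hq : q p
  · have hmem : p.1 ∈ (roles.filter q).map (·.1) :=
      List.mem_map.2 ⟨p, List.mem_filter.2 ⟨hp, hq⟩, rfl⟩
    rw [if_pos hq, List.count_eq_one_of_mem hndf hmem]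
  · have hmem : p.1 ∉ (roles.filter q).map (·.1) := by
      intro h
      rcases List.mem_map.1 h with ⟨x, hx, hx1⟩
      rcases List.mem_filter.1 hx with ⟨hxr, hxq⟩
      have := hinj x hxr p hp hx1
      subst this; exact hq hxq
    rw [if_neg hq, List.count_eq_zero_of_not_mem hmem]

-- |X ∩ U| counted from either side, for nodup lists
theorem pv_filter_length_comm (X U : List String) (hX : X.Nodup) (hU : U.Nodup) :
    (X.filter (fun x => decide (x ∈ U))).length = (U.filter (fun u => decide (u ∈ X))).length := by
  rw [← List.toFinset_card_of_nodup (hX.filter _), ← List.toFinset_card_of_nodup (hU.filter _)]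
  congr 1
  rw [List.toFinset_filter, List.toFinset_filter]
  ext a
  simp [Finset.mem_filter, List.mem_toFinset]
  tauto

-- ===== VERDICT (by name: the statement is the Claim_ definition above) =====
theorem recommend_roles_spec : Claim_equal_recommend_roles := by
  intro skills roles_dict _hDom hPre
  obtain ⟨hnd, _hreq⟩ := hPre
  unfold Spec_recommend_roles
  simp only [recommend_roles, recommend_roles_alt]
  have hsplit :
      (List.foldl (fun (st : PySem.Dict String (List String) × PySem.Dict String Int) p =>
        ((List.foldl (fun (q : PySem.Set String × PySem.Dict String (List String)) s =>
            if q.1.contains (PySem.Str.lower s) = true then q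
            else (q.1.add (PySem.Str.lower s), q.2.modify (PySem.Str.lower s) [] fun x => x ++ [p.1]))
          (PySem.Set.empty, st.1) (pvReq p.2)).2, st.2.insert p.1 0))
        (PySem.Dict.empty, PySem.Dict.empty) roles_dict)
      = (List.foldl (fun idx p =>
          (List.foldl (fun (q : PySem.Set String × PySem.Dict String (List String)) s =>
            if q.1.contains (PySem.Str.lower s) = true then q
            else (q.1.add (PySem.Str.lower s), q.2.modify (PySem.Str.lower s) [] fun x => x ++ [p.1]))
          (PySem.Set.empty, idx) (pvReq p.2)).2) PySem.Dict.empty roles_dict,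
         List.foldl (fun rs p => rs.insert p.1 0) PySem.Dict.empty roles_dict) :=
    PySem.List.foldl_prod_mk
      (fun idx (p : String × List (String × List String)) =>
        (List.foldl (fun (q : PySem.Set String × PySem.Dict String (List String)) s =>
          if q.1.contains (PySem.Str.lower s) = true then q
          else (q.1.add (PySem.Str.lower s), q.2.modify (PySem.Str.lower s) [] fun x => x ++ [p.1]))
        (PySem.Set.empty, idx) (pvReq p.2)).2)
      (fun rs (p : String × List (String × List String)) => rs.insert p.1 (0 : Int))
      roles_dict PySem.Dict.empty PySem.Dict.empty
  rw [hsplit]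
  set U : PySem.Set String := PySem.Set.ofList (List.map PySem.Str.lower skills) with hU
  set IDX : PySem.Dict String (List String) := List.foldl (fun idx p =>
          (List.foldl (fun (q : PySem.Set String × PySem.Dict String (List String)) s =>
            if q.1.contains (PySem.Str.lower s) = true then q
            else (q.1.add (PySem.Str.lower s), q.2.modify (PySem.Str.lower s) [] fun x => x ++ [p.1]))
          (PySem.Set.empty, idx) (pvReq p.2)).2) PySem.Dict.empty roles_dict with hIDX
  set RS0 : PySem.Dict String Int := List.foldl (fun rs p => rs.insert p.1 0) PySem.Dict.empty roles_dict with hRS0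
  clear_value U IDX RS0
  have hRS0items : RS0.items = roles_dict.map (fun p => (p.1, (0 : Int))) := by
    rw [hRS0]
    have := PySem.Dict.items_foldl_insert_fresh roles_dict (fun p => p.1) (fun _ => (0 : Int))
      PySem.Dict.empty (fun a _ => by simp) (by simpa using hnd)
    simpa using this
  have hkeys0 : RS0.keys = roles_dict.map Prod.fst := by
    simp only [PySem.Dict.keys, hRS0items, List.map_map]
    rfl
  have hkeysnd : RS0.keys.Nodup := by rw [hkeys0]; exact hnd
  have hIDXg : ∀ sl, IDX.getD sl []
      = (roles_dict.filter (fun p => decide (sl ∈ (pvReq p.2).map PySem.Str.lower))).map (·.1) := by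
    intro sl
    rw [hIDX]
    have := pv_index_getD roles_dict PySem.Dict.empty sl
    simpa using this
  have hkeysfin : (U.foldl (fun rs sl => (IDX.getD sl []).foldl (fun rs r => rs.modify r 0 (· + 1)) rs) RS0).keys = RS0.keys := by
    apply pv_phase2_keys
    intro sl _ x hx
    rw [hIDXg sl] at hx
    rcases List.mem_map.1 hx with ⟨pp, hpp, rfl⟩
    rw [hkeys0]
    exact List.mem_map.2 ⟨pp, (List.mem_filter.1 hpp).1, rfl⟩
  have hAitems :
      (List.foldl (fun rs p => rs.insert p.1
          ((List.length ((PySem.Set.ofList (List.map PySem.Str.lower (pvReq p.2))).inter U) : Int)))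
        PySem.Dict.empty roles_dict).items
      = roles_dict.map (fun p => (p.1,
          ((List.length ((PySem.Set.ofList (List.map PySem.Str.lower (pvReq p.2))).inter U) : Int)))) := by
    have := PySem.Dict.items_foldl_insert_fresh roles_dict (fun p => p.1)
      (fun p => ((List.length ((PySem.Set.ofList (List.map PySem.Str.lower (pvReq p.2))).inter U) : Int)))
      PySem.Dict.empty (fun a _ => by simp) (by simpa using hnd)
    simpa using this
  have hval : ∀ p ∈ roles_dict,
      (U.foldl (fun rs sl => (IDX.getD sl []).foldl (fun rs r => rs.modify r 0 (· + 1)) rs) RS0).getD p.1 0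
      = ((List.length ((PySem.Set.ofList (List.map PySem.Str.lower (pvReq p.2))).inter U) : Int)) := by
    intro p hp
    rw [pv_phase2_getD]
    have h0 : RS0.getD p.1 0 = 0 :=
      PySem.Dict.getD_of_mem_items RS0 (by rw [hRS0items]; exact List.mem_map.2 ⟨p, hp, rfl⟩) hkeysnd 0
    rw [h0, zero_add]
    have hcnt : ∀ sl ∈ U, ((IDX.getD sl []).count p.1 : Int)
        = if decide (sl ∈ (pvReq p.2).map PySem.Str.lower) then (1 : Int) else 0 := by
      intro sl _
      rw [hIDXg sl, pv_count_filter roles_dict hnd p hp]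
      split <;> simp
    rw [List.map_congr_left hcnt, PySem.List.sum_map_ite_one_zero, List.countP_eq_length_filter]
    have hfc : U.filter (fun sl => decide (sl ∈ (pvReq p.2).map PySem.Str.lower))
        = U.filter (fun sl => decide (sl ∈ PySem.Set.ofList ((pvReq p.2).map PySem.Str.lower))) := by
      apply List.filter_congr
      intro x _
      simp [PySem.Set.mem_ofList]
    rw [hfc, ← pv_filter_length_comm _ U (PySem.Set.nodup_ofList _) (by rw [hU]; exact PySem.Set.nodup_ofList _)]
    congr 2
    apply List.filter_congr
    intro x _
    simp
  have hfinitems :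
      (U.foldl (fun rs sl => (IDX.getD sl []).foldl (fun rs r => rs.modify r 0 (· + 1)) rs) RS0).items
      = roles_dict.map (fun p => (p.1,
          ((List.length ((PySem.Set.ofList (List.map PySem.Str.lower (pvReq p.2))).inter U) : Int)))) := by
    rw [PySem.Dict.items_eq_map_keys _ (by rw [hkeysfin]; exact hkeysnd) (0 : Int)]
    rw [hkeysfin, hkeys0, List.map_map]
    apply List.map_congr_left
    intro p hp
    simp only [Function.comp]
    rw [hval p hp]
  rw [hAitems, hfinitems]
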